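-- pv_equiv track=rewrite | github.com/victormarti11/ALCP | Entrega_1/entrega1.py | word2number
-- ===== SOURCE A (Python) =====
-- def word2number(w,n):
--     num_pal_let = 0
--     number = 0
--     p = n                                           # Contador para acabar al leer el último caracter de w
--     while p > n - len(w):
--         if ord(w[n-p])-97 == 0:                     # Se obtiene el valor de unicode del caracter correspondiente.
--             number += 1
--             p -= 1
--         else:
--             for k in range(1,p+1,1):
--                 num_pal_let += 26**(k-1)
--             number += (ord(w[n-p])-97)*num_pal_let + 1  # Sumamos al número el índice de la letra correspondiente por
--             num_pal_let = 0                             # num_pal_let definido igual que en la función anterior + 1 para el correcto funcionamiento del algoritmo.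
--             p -= 1
--     return number
-- ===== SOURCE B (Python) =====
-- def word2number(w, n):
--     # One pass over w from the rightmost character, maintaining the geometric
--     # sum S(p) = sum_{k=1..p} 26**(k-1) incrementally (S(p+1) = 26*S(p) + 1)
--     # instead of recomputing it from scratch for every character.
--     number = 0
--     p = n - len(w)                       # one below the smallest p used
--     g = (26**p - 1) // 25 if p >= 1 else 0   # g = S(p)
--     for ch in reversed(w):
--         p += 1
--         g = 26 * g + 1 if p >= 1 else 0
--         number += (ord(ch) - 97) * g + 1
--     return number
-- ===== Notes on version B (the rewrite author's own statement) =====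
-- stated objective: faster
-- what changed: B replaces A's per-character inner loop that rebuilds the geometric sum sum_{k=1..p} 26^(k-1) from scratch with a single right-to-left pass that maintains that sum incrementally via S(p+1)=26*S(p)+1 (seeded once by the closed form (26^p-1)//25).
import Mathlib
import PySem

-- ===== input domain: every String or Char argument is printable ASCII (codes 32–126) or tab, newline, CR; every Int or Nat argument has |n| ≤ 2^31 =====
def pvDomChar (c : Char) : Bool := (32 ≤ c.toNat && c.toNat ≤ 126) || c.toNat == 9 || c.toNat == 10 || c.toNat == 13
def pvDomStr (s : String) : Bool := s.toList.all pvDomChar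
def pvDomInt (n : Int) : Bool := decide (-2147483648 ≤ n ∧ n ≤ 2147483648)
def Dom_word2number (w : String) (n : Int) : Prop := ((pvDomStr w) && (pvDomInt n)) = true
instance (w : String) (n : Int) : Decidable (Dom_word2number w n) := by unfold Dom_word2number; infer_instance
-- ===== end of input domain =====

-- B maintains the geometric sum incrementally in one pass (faster) instead of A's
-- per-character inner loop; return values proved identical on all inputs.

-- ===== PORT A =====
-- while loop: p runs n, n-1, …, n-len(w)+1 — exactly w.length iterations, encoded as fuel.
-- State (num_pal_let, number, p) carried literally; w[n-p] via PySem.List.pyGet? on w.toList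
-- (the none branch is unreachable: the index n-p is always in range).
def w2nLoopA (cs : List Char) (n : Int) : Nat → Int → Int → Int → Int
  | 0, _, number, _ => number
  | fuel + 1, num_pal_let, number, p =>
    match PySem.List.pyGet? cs (n - p) with
    | none => number
    | some ch =>
      if ((ch.toNat : Int) - 97) = 0 then
        w2nLoopA cs n fuel num_pal_let (number + 1) (p - 1)
      else
        let npl' := (PySem.List.pyRange 1 (p + 1) 1).foldl
          (fun acc k => acc + (26 : Int) ^ (k - 1).toNat) num_pal_let
        w2nLoopA cs n fuel 0 (number + ((ch.toNat : Int) - 97) * npl' + 1) (p - 1)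

def word2number (w : String) (n : Int) : Int :=
  w2nLoopA w.toList n w.toList.length 0 0 n

-- ===== PORT B =====
-- one fold over reversed(w); state (number, g, p) with g the running geometric sum
def w2nStepB (st : Int × Int × Int) (ch : Char) : Int × Int × Int :=
  let p := st.2.2 + 1
  let g := if 1 ≤ p then 26 * st.2.1 + 1 else 0
  (st.1 + ((ch.toNat : Int) - 97) * g + 1, g, p)

def word2number_alt (w : String) (n : Int) : Int :=
  let cs := w.toList
  let p : Int := n - cs.length
  let g : Int := if 1 ≤ p then PySem.Int.floordiv ((26 : Int) ^ p.toNat - 1) 25 else 0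
  (cs.reverse.foldl w2nStepB (0, g, p)).1

-- ===== PRECONDITION & SPEC =====
def Spec_word2number (w : String) (n : Int) (out : Int) : Prop := out = word2number_alt w n
instance (w : String) (n : Int) (out : Int) : Decidable (Spec_word2number w n out) := by unfold Spec_word2number; infer_instance

-- ===== CLAIM (what is proved, stated in full; the proofs are below) =====
def Claim_equal_word2number : Prop := ∀ (w : String) (n : Int), Dom_word2number w n → Spec_word2number w n (word2number w n)

-- ===== LEMMAS AND PROOFS =====

-- reference value: geomS k = Σ_{j<k} 26^j;  refW cs p = Σ_i ((ord cs[i] - 97) * geomS (p-i) + 1)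
def geomS : Nat → Int
  | 0 => 0
  | k + 1 => 26 * geomS k + 1

def refW : List Char → Int → Int
  | [], _ => 0
  | c :: rest, p => (((c.toNat : Int) - 97) * geomS p.toNat + 1) + refW rest (p - 1)

theorem geomS_succ_pow (k : Nat) : geomS (k + 1) = geomS k + 26 ^ k := by
  induction k with
  | zero => simp [geomS]
  | succ k ih =>
    calc geomS (k + 2) = 26 * geomS (k + 1) + 1 := rfl
      _ = 26 * (geomS k + 26 ^ k) + 1 := by rw [ih]
      _ = (26 * geomS k + 1) + 26 ^ (k + 1) := by ring
      _ = geomS (k + 1) + 26 ^ (k + 1) := rfl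

theorem sgeo_nat (k : Nat) (npl : Int) :
    (PySem.List.pyRange 1 ((k : Int) + 1) 1).foldl
      (fun acc j => acc + (26 : Int) ^ (j - 1).toNat) npl = npl + geomS k := by
  induction k with
  | zero => simp [PySem.List.pyRange_one_eq_nil, geomS]
  | succ k ih =>
    have h : (1 : Int) ≤ (k : Int) + 1 := by omega
    have hsplit : ((k : Int) + 1 + 1 : Int) = (((k : Int) + 1) + 1) := by ring
    rw [show ((k + 1 : Nat) : Int) + 1 = (((k : Int) + 1) + 1) by push_cast; ring,
        PySem.List.pyRange_one_succ_right h, List.foldl_append]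
    simp only [List.foldl, ih]
    have ht : (((k : Int) + 1) - 1).toNat = k := by omega
    rw [ht, geomS_succ_pow]; ring

theorem sgeo_int (p npl : Int) :
    (PySem.List.pyRange 1 (p + 1) 1).foldl
      (fun acc j => acc + (26 : Int) ^ (j - 1).toNat) npl = npl + geomS p.toNat := by
  rcases le_or_gt p 0 with hp | hp
  · have h0 : p.toNat = 0 := by omega
    rw [PySem.List.pyRange_one_eq_nil (by omega), h0]
    simp [geomS]
  · have hk : p = ((p.toNat : Int)) := by omega
    rw [hk]
    exact sgeo_nat p.toNat npl

-- A's loop computes refW on the remaining suffix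
theorem aloop_eq (suf : List Char) : ∀ (pre : List Char) (n num : Int),
    w2nLoopA (pre ++ suf) n suf.length 0 num (n - pre.length) =
      num + refW suf (n - pre.length) := by
  induction suf with
  | nil => intro pre n num; simp [w2nLoopA, refW]
  | cons c rest ih =>
    intro pre n num
    have hidx : n - (n - (pre.length : Int)) = (pre.length : Int) := by ring
    have hget : PySem.List.pyGet? (pre ++ c :: rest) (n - (n - (pre.length : Int))) = some c := by
      rw [hidx]
      exact_mod_cast PySem.List.pyGet?_append_length (pre := pre) (y := c) (ys := rest)
    have hp1 : n - ((pre ++ [c]).length : Int) = n - (pre.length : Int) - 1 := by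
      simp only [List.length_append, List.length_cons, List.length_nil]; push_cast; ring
    have hrec := ih (pre ++ [c]) n
    rw [List.append_assoc, List.singleton_append] at hrec
    show w2nLoopA (pre ++ c :: rest) n (rest.length + 1) 0 num (n - (pre.length : Int)) = _
    rw [w2nLoopA]
    rw [hget]
    simp only []
    by_cases hc : ((c.toNat : Int) - 97) = 0
    · rw [if_pos hc]
      have := hrec (num + 1)
      rw [hp1] at this
      rw [this]
      show _ = num + ((((c.toNat : Int) - 97) * geomS (n - (pre.length : Int)).toNat + 1)
        + refW rest (n - (pre.length : Int) - 1))
      rw [hc]; ring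
    · rw [if_neg hc]
      simp only [sgeo_int]
      have := hrec (num + ((c.toNat : Int) - 97) * (0 + geomS (n - (pre.length : Int)).toNat) + 1)
      rw [hp1] at this
      rw [this]
      show _ = num + ((((c.toNat : Int) - 97) * geomS (n - (pre.length : Int)).toNat + 1)
        + refW rest (n - (pre.length : Int) - 1))
      ring

theorem word2number_eq_ref (w : String) (n : Int) : word2number w n = refW w.toList n := by
  have h := aloop_eq w.toList [] n 0
  simpa [word2number] using h

-- B-side: the step keeps g = geomS p.toNat
theorem gstep (q g : Int) (hg : g = geomS q.toNat) :
    (if 1 ≤ q + 1 then 26 * g + 1 else 0) = geomS (q + 1).toNat := by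
  rcases le_or_gt 0 q with hq | hq
  · have h1 : (1 : Int) ≤ q + 1 := by omega
    have ht : (q + 1).toNat = q.toNat + 1 := by omega
    rw [if_pos h1, ht, hg]; rfl
  · have h1 : ¬ (1 : Int) ≤ q + 1 := by omega
    have ht : (q + 1).toNat = 0 := by omega
    rw [if_neg h1, ht]; rfl

theorem bfold (cs : List Char) : ∀ (num p : Int),
    cs.reverse.foldl w2nStepB (num, geomS p.toNat, p) =
      (num + refW cs (p + cs.length), geomS (p + cs.length).toNat, p + cs.length) := by
  induction cs with
  | nil => intro num p; simp [refW]
  | cons c rest ih =>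
    intro num p
    rw [List.reverse_cons, List.foldl_append, ih num p]
    simp only [List.foldl, w2nStepB]
    have hlen : ((c :: rest).length : Int) = (rest.length : Int) + 1 := by push_cast [List.length_cons]; ring
    have hg := gstep (p + rest.length) (geomS (p + rest.length).toNat) rfl
    refine Prod.ext ?_ (Prod.ext ?_ ?_) <;> simp only [hlen, hg]
    · show num + refW rest (p + rest.length) + ((c.toNat : Int) - 97) *
        geomS (p + rest.length + 1).toNat + 1 = num + refW (c :: rest) (p + (rest.length + 1))
      show _ = num + ((((c.toNat : Int) - 97) * geomS (p + (rest.length + 1)).toNat + 1)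
        + refW rest (p + (rest.length + 1) - 1))
      have e1 : p + rest.length + 1 = p + ((rest.length : Int) + 1) := by ring
      have e2 : p + ((rest.length : Int) + 1) - 1 = p + rest.length := by ring
      rw [e1, e2]; ring
    · show geomS (p + rest.length + 1).toNat = geomS (p + ((rest.length : Int) + 1)).toNat
      congr 1; omega
    · show p + (rest.length : Int) + 1 = p + ((rest.length : Int) + 1)
      ring

theorem pow26_sub_one (k : Nat) : (26 : Int) ^ k - 1 = 25 * geomS k := by
  induction k with
  | zero => simp [geomS]
  | succ k ih =>
    have : (26 : Int) ^ (k + 1) - 1 = 26 * ((26 : Int) ^ k - 1) + 25 := by ring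
    rw [this, ih]; show _ = 25 * (26 * geomS k + 1); ring

theorem ginit (p : Int) :
    (if 1 ≤ p then PySem.Int.floordiv ((26 : Int) ^ p.toNat - 1) 25 else 0) = geomS p.toNat := by
  rcases le_or_gt 1 p with hp | hp
  · rw [if_pos hp, pow26_sub_one,
        PySem.Int.floordiv_eq_ediv_of_pos (by norm_num : (0:Int) < 25),
        Int.mul_ediv_cancel_left _ (by norm_num : (25:Int) ≠ 0)]
  · have ht : p.toNat = 0 := by omega
    rw [if_neg (by omega), ht]; rfl

theorem word2number_alt_eq_ref (w : String) (n : Int) : word2number_alt w n = refW w.toList n := by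
  unfold word2number_alt
  simp only []
  rw [ginit (n - (w.toList.length : Int)), bfold w.toList 0 (n - (w.toList.length : Int))]
  simp only []
  rw [show n - (w.toList.length : Int) + (w.toList.length : Int) = n by ring]
  ring

-- ===== VERDICT (by name: the statement is the Claim_ definition above) =====
theorem word2number_spec : Claim_equal_word2number := by
  intro w n _
  unfold Spec_word2number
  rw [word2number_eq_ref, word2number_alt_eq_ref]
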